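-- pv_equiv track=rewrite | github.com/kononenkoVlad/LAB4 | functions.py | find_paths_3
-- ===== SOURCE A (Python) =====
-- def find_paths_3(matrix_1):
--     paths = []
--     length = len(matrix_1)
--     for i_1 in range(length):
--         for i_2 in range(length):
--             for i_3 in range(length):
--                 for i_4 in range(length):
--                     if matrix_1[i_1][i_2] and matrix_1[i_2][i_3] and matrix_1[i_3][i_4]:
--                         if (i_1 == i_2 and i_2 == i_3) or (i_2 == i_3 and i_3 == i_4) or (i_1 == i_3 and i_2 == i_4):
--                             continue
--                         paths.append([i_1+1, i_2+1, i_3+1, i_4+1])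
--     return paths
-- ===== SOURCE B (Python) =====
-- def find_paths_3(matrix_1):
--     n = len(matrix_1)
--     adj = [[j for j in range(n) if matrix_1[i][j]] for i in range(n)]
--     return [[i1 + 1, i2 + 1, i3 + 1, i4 + 1]
--             for i1 in range(n)
--             for i2 in adj[i1]
--             for i3 in adj[i2]
--             for i4 in adj[i3]
--             if not ((i1 == i2 == i3) or (i2 == i3 == i4) or (i1 == i3 and i2 == i4))]
-- ===== Notes on version B (the rewrite author's own statement) =====
-- stated objective: idiomatic
-- what changed: Builds adjacency lists once and enumerates walks with a comprehension whose inner loops range only over actual neighbors, instead of four nested full-range loops re-testing all three edges at the innermost level.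
import Mathlib
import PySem

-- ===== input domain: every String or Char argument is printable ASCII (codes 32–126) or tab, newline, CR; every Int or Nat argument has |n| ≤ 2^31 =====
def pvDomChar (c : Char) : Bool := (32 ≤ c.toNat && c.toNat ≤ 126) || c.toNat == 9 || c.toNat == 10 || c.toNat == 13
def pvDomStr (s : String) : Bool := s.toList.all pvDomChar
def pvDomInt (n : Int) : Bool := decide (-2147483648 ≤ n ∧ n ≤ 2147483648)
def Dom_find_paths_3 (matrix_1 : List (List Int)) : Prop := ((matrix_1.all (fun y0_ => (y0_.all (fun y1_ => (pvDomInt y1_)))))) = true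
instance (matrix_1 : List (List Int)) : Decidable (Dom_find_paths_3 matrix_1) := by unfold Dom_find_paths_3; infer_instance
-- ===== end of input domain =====

-- B replaces A's four full-range nested loops (which re-test all three edges at the
-- innermost level) by adjacency lists built once, then nested loops over neighbors only.

-- matrix_1[i][j] for in-range indices (Pre_ guarantees every access is in range)
def pvAt (m : List (List Int)) (i j : Nat) : Int := (m.getD i []).getD j 0

-- ===== PORT A =====
def find_paths_3 (matrix_1 : List (List Int)) : List (List Int) :=
  let length := matrix_1.length
  (List.range length).foldl (fun paths i_1 =>
    (List.range length).foldl (fun paths i_2 =>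
      (List.range length).foldl (fun paths i_3 =>
        (List.range length).foldl (fun paths i_4 =>
          if pvAt matrix_1 i_1 i_2 ≠ 0 ∧ pvAt matrix_1 i_2 i_3 ≠ 0 ∧ pvAt matrix_1 i_3 i_4 ≠ 0 then
            if (i_1 = i_2 ∧ i_2 = i_3) ∨ (i_2 = i_3 ∧ i_3 = i_4) ∨ (i_1 = i_3 ∧ i_2 = i_4) then
              paths
            else
              paths ++ [[(i_1 : Int) + 1, (i_2 : Int) + 1, (i_3 : Int) + 1, (i_4 : Int) + 1]]
          else paths) paths) paths) paths) []

-- ===== PORT B =====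
def find_paths_3_alt (matrix_1 : List (List Int)) : List (List Int) :=
  let n := matrix_1.length
  let adj := (List.range n).map (fun i => (List.range n).filter (fun j => pvAt matrix_1 i j != 0))
  (List.range n).flatMap (fun i1 =>
    (adj.getD i1 []).flatMap (fun i2 =>
      (adj.getD i2 []).flatMap (fun i3 =>
        (adj.getD i3 []).flatMap (fun i4 =>
          if (i1 = i2 ∧ i2 = i3) ∨ (i2 = i3 ∧ i3 = i4) ∨ (i1 = i3 ∧ i2 = i4) then []
          else [[(i1 : Int) + 1, (i2 : Int) + 1, (i3 : Int) + 1, (i4 : Int) + 1]]))))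

-- ===== PRECONDITION & SPEC =====
-- A indexes matrix_1[i][j] for all i, j < len(matrix_1), so it raises IndexError exactly
-- when some row is shorter than the matrix; Pre_ is exactly where A returns.
def Pre_find_paths_3 (matrix_1 : List (List Int)) : Prop :=
  ∀ row ∈ matrix_1, matrix_1.length ≤ row.length
instance (matrix_1 : List (List Int)) : Decidable (Pre_find_paths_3 matrix_1) := by
  unfold Pre_find_paths_3; infer_instance

def pvWitness_find_paths_3 : List (List Int) := [[0, 1, 1], [1, 0, 1], [1, 1, 0]]

def Spec_find_paths_3 (matrix_1 : List (List Int)) (out : List (List Int)) : Prop := out = find_paths_3_alt matrix_1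
instance (matrix_1 : List (List Int)) (out : List (List Int)) : Decidable (Spec_find_paths_3 matrix_1 out) := by unfold Spec_find_paths_3; infer_instance

-- ===== CLAIM (what is proved, stated in full; the proofs are below) =====
def Claim_equal_find_paths_3 : Prop := ∀ (matrix_1 : List (List Int)), Dom_find_paths_3 matrix_1 → Pre_find_paths_3 matrix_1 → Spec_find_paths_3 matrix_1 (find_paths_3 matrix_1)

-- ===== LEMMAS AND PROOFS =====

-- A's loop body (guard + degeneracy skip + append) as an extend-with-flatMap.
theorem foldl_guard {γ : Type} (l : List Nat) (acc : List γ)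
    (C Dg : Nat → Prop) [DecidablePred C] [DecidablePred Dg] (p : Nat → γ) :
    l.foldl (fun paths i => if C i then (if Dg i then paths else paths ++ [p i]) else paths) acc
      = acc ++ l.flatMap (fun i => if C i then (if Dg i then [] else [p i]) else []) := by
  induction l generalizing acc with
  | nil => simp
  | cons hd tl ih =>
    simp only [List.foldl_cons, List.flatMap_cons]
    rw [ih]
    split_ifs <;> simp

theorem getD_map_range {α : Type} (f : Nat → α) (n i : Nat) (h : i < n) (d : α) :
    (((List.range n).map f).getD i d) = f i := by
  rw [List.getD_eq_getElem?_getD]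
  simp [h]

theorem flatMap_filter {α β : Type} (p : α → Bool) (f : α → List β) (l : List α) :
    (l.filter p).flatMap f = l.flatMap (fun x => if p x then f x else []) := by
  induction l with
  | nil => rfl
  | cons hd tl ih =>
    by_cases h : p hd = true <;> simp [h, ih]

theorem flatMap_nil' {α β : Type} (l : List α) : l.flatMap (fun _ => ([] : List β)) = [] := by
  induction l with
  | nil => rfl
  | cons hd tl ih => simp [List.flatMap_cons, ih]

theorem flatMap_congr' {α β : Type} (l : List α) (f g : α → List β)
    (h : ∀ x ∈ l, f x = g x) : l.flatMap f = l.flatMap g := by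
  induction l with
  | nil => rfl
  | cons hd tl ih =>
    simp only [List.flatMap_cons]
    rw [h hd (List.mem_cons_self), ih (fun x hx => h x (List.mem_cons_of_mem _ hx))]

-- ===== VERDICT (by name: the statement is the Claim_ definition above) =====
theorem find_paths_3_spec : Claim_equal_find_paths_3 := by
  intro m _ _
  unfold Spec_find_paths_3 find_paths_3 find_paths_3_alt
  simp only [foldl_guard, PySem.List.foldl_append_eq_flatMap, List.nil_append]
  apply flatMap_congr'
  intro i1 h1
  rw [getD_map_range _ _ _ (List.mem_range.mp h1), flatMap_filter]
  apply flatMap_congr'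
  intro i2 h2
  by_cases e12 : pvAt m i1 i2 = 0
  · simp [e12, flatMap_nil']
  · rw [if_pos (by simp [e12]), getD_map_range _ _ _ (List.mem_range.mp h2), flatMap_filter]
    apply flatMap_congr'
    intro i3 h3
    by_cases e23 : pvAt m i2 i3 = 0
    · simp [e12, e23, flatMap_nil']
    · rw [if_pos (by simp [e23]), getD_map_range _ _ _ (List.mem_range.mp h3), flatMap_filter]
      apply flatMap_congr'
      intro i4 _
      by_cases e34 : pvAt m i3 i4 = 0 <;> simp [e12, e23, e34]
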